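-- pv_equiv track=rewrite | github.com/gb85150/NSI | 1ere/Spécification_Prog_Defensive/chateaucartes.py | nbr_cartes
-- ===== SOURCE A (Python) =====
-- def nbr_cartes(etages: int) -> int:
--     """
--     nbr_cartes
--
--     :param etages: nbre d'étages désirés
--     :result: nbre de cartes nécessaires à la construction du chateau de cartes
--     de :etages:
--     """
--     assert etages >= 1, "le nombre d'étages doit être un entier positif"
--     somme = 0
--     for i in range(1, etages+1):
--         somme = somme + i * 3 - 1
--         numetage = i
--     assert somme > 1, "Erreur de calcul de somme"
--     return somme, numetage
-- ===== SOURCE B (Python) =====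
-- def nbr_cartes(etages: int) -> int:
--     assert etages >= 1, "le nombre d'étages doit être un entier positif"
--     return 3 * etages * (etages + 1) // 2 - etages, etages
-- ===== Notes on version B (the rewrite author's own statement) =====
-- stated objective: faster
-- what changed: Replaced the O(n) accumulation loop by the closed-form arithmetic sum 3n(n+1)/2 - n with numetage = etages.
import Mathlib
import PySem

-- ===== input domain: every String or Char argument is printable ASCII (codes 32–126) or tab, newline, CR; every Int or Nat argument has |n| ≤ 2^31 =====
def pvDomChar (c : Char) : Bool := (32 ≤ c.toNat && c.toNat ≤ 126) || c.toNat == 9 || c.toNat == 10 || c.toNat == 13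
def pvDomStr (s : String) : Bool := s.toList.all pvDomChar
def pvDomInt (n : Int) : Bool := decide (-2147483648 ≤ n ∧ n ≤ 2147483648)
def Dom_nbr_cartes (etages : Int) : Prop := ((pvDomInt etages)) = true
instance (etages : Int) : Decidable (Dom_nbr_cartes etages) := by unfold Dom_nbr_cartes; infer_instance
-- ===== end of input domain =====

-- B replaces A's O(n) accumulation loop by the closed-form sum 3n(n+1)/2 - n (objective: faster).

-- ===== PORT A =====
-- A's loop 'for i in range(1, etages+1): somme += i*3 - 1; numetage = i' as a foldl over
-- the same range with state (somme, numetage); numetage starts at 0 (Python leaves it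
-- unbound, but Pre_ guarantees the loop body runs at least once, assigning it).
def nbr_cartes (etages : Int) : Int × Int :=
  (PySem.List.pyRange 1 (etages + 1) 1).foldl
    (fun st i => (st.1 + i * 3 - 1, i)) (0, 0)

-- ===== PORT B =====
def nbr_cartes_alt (etages : Int) : Int × Int :=
  (PySem.Int.floordiv (3 * etages * (etages + 1)) 2 - etages, etages)

-- ===== PRECONDITION & SPEC =====
-- A asserts etages >= 1 (AssertionError otherwise); the second assert always holds then.
def Pre_nbr_cartes (etages : Int) : Prop := 1 ≤ etages
instance (etages : Int) : Decidable (Pre_nbr_cartes etages) := by unfold Pre_nbr_cartes; infer_instance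
def pvWitness_nbr_cartes : Int := 3

def Spec_nbr_cartes (etages : Int) (out : Int × Int) : Prop := out = nbr_cartes_alt etages
instance (etages : Int) (out : Int × Int) : Decidable (Spec_nbr_cartes etages out) := by unfold Spec_nbr_cartes; infer_instance

-- ===== CLAIM (what is proved, stated in full; the proofs are below) =====
def Claim_equal_nbr_cartes : Prop := ∀ (etages : Int), Dom_nbr_cartes etages → Pre_nbr_cartes etages → Spec_nbr_cartes etages (nbr_cartes etages)

-- ===== LEMMAS AND PROOFS =====

-- The sum A's loop accumulates, written as the loop's recurrence.
def loopSum : ℕ → Int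
  | 0 => 0
  | k + 1 => loopSum k + ((k : Int) + 1) * 3 - 1

-- The loop over range(1, n+1) computes (s + loopSum n, last i); proved for every start state.
theorem nbr_cartes_loop (n : ℕ) (s t : Int) :
    (PySem.List.pyRange 1 ((n : Int) + 1) 1).foldl (fun st i => (st.1 + i * 3 - 1, i)) (s, t)
    = (s + loopSum n, if n = 0 then t else (n : Int)) := by
  induction n generalizing s t with
  | zero => simp [PySem.List.pyRange_one_eq_nil, loopSum]
  | succ k ih =>
      rw [show ((k + 1 : ℕ) : Int) + 1 = ((k : Int) + 1) + 1 by push_cast; ring,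
        PySem.List.pyRange_one_succ_right (by omega), List.foldl_append]
      simp only [List.foldl_cons, List.foldl_nil, ih, loopSum, Prod.mk.injEq]
      constructor
      · ring
      · split_ifs <;> simp_all

theorem loopSum_double (n : ℕ) : 2 * loopSum n = 3 * (n : Int) * ((n : Int) + 1) - 2 * n := by
  induction n with
  | zero => simp [loopSum]
  | succ k ih => simp only [loopSum]; push_cast at ih ⊢; ring_nf at ih ⊢; omega

theorem nbr_cartes_spec : Claim_equal_nbr_cartes := by
  intro etages _ hpre
  unfold Pre_nbr_cartes at hpre
  unfold Spec_nbr_cartes nbr_cartes nbr_cartes_alt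
  obtain ⟨n, rfl⟩ : ∃ n : ℕ, etages = (n : Int) :=
    ⟨etages.toNat, (Int.toNat_of_nonneg (by omega)).symm⟩
  rw [nbr_cartes_loop, PySem.Int.floordiv_eq_ediv_of_pos (by omega)]
  have hn : n ≠ 0 := by
    intro h; subst h; exact absurd hpre (by norm_num [Pre_nbr_cartes])
  have h2 := loopSum_double n
  simp only [Prod.mk.injEq, if_neg hn]
  exact ⟨by omega, by simp⟩
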